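-- pv_equiv track=rewrite | github.com/lucasalme1da/codesignal | Intro/42 - bishopAndPawn.py | bishopAndPawn
-- ===== SOURCE A (Python) =====
-- def bishopAndPawn(bishop, pawn):
--     # Drawing the board
--     board = [['a8', 'b8', 'c8', 'd8', 'e8', 'f8', 'g8', 'h8'],
--              ['a7', 'b7', 'c7', 'd7', 'e7', 'f7', 'g7', 'h7'],
--              ['a6', 'b6', 'c6', 'd6', 'e6', 'f6', 'g6', 'h6'],
--              ['a5', 'b5', 'c5', 'd5', 'e5', 'f5', 'g5', 'h5'],
--              ['a4', 'b4', 'c4', 'd4', 'e4', 'f4', 'g4', 'h4'],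
--              ['a3', 'b3', 'c3', 'd3', 'e3', 'f3', 'g3', 'h3'],
--              ['a2', 'b2', 'c2', 'd2', 'e2', 'f2', 'g2', 'h2'],
--              ['a1', 'a2', 'c1', 'd1', 'e1', 'f1', 'g1', 'h1']]
--     # Checking bishop possible movements
--     posMov = []
--     for i in range(len(board[0])):
--         for j in range(len(board[0])):
--             if (board[i][j] == bishop):
--                 # Moving topLeft
--                 a, b = i, j
--                 while(a != 0 and b != 0):
--                     a -= 1
--                     b -= 1
--                     posMov.append(board[a][b])
--
--                 # Moving botLeft
--                 a, b = i, j
--                 while(a != len(board[0]) - 1 and b != 0):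
--                     a += 1
--                     b -= 1
--                     posMov.append(board[a][b])
--
--                 # Moving topRight
--                 a, b = i, j
--                 while(a != 0 and b != len(board[0]) - 1):
--                     a -= 1
--                     b += 1
--                     posMov.append(board[a][b])
--
--                 # Moving botRight
--                 a, b = i, j
--                 while(a != len(board[0]) - 1 and b != len(board[0]) - 1):
--                     a += 1
--                     b += 1
--                     posMov.append(board[a][b])
--     # So we just have to check if the pawn position is in posMov and return the result
--     return pawn in posMov
-- ===== SOURCE B (Python) =====
-- def bishopAndPawn(bishop, pawn):
--     # Same hard-coded board as the original (including the 'a2' typo in the last row).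
--     board = [['a8', 'b8', 'c8', 'd8', 'e8', 'f8', 'g8', 'h8'],
--              ['a7', 'b7', 'c7', 'd7', 'e7', 'f7', 'g7', 'h7'],
--              ['a6', 'b6', 'c6', 'd6', 'e6', 'f6', 'g6', 'h6'],
--              ['a5', 'b5', 'c5', 'd5', 'e5', 'f5', 'g5', 'h5'],
--              ['a4', 'b4', 'c4', 'd4', 'e4', 'f4', 'g4', 'h4'],
--              ['a3', 'b3', 'c3', 'd3', 'e3', 'f3', 'g3', 'h3'],
--              ['a2', 'b2', 'c2', 'd2', 'e2', 'f2', 'g2', 'h2'],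
--              ['a1', 'a2', 'c1', 'd1', 'e1', 'f1', 'g1', 'h1']]
--     n = len(board[0])
--     # All cells holding the bishop's label (the duplicated 'a2' can yield two).
--     positions = [(i, j) for i in range(n) for j in range(n) if board[i][j] == bishop]
--     # One whole-board pass per bishop cell: a cell is attacked iff it lies on a
--     # common diagonal (|a-i| == |b-j|) and is not the bishop's own cell.
--     for (i, j) in positions:
--         for a in range(n):
--             for b in range(n):
--                 if (a, b) != (i, j) and abs(a - i) == abs(b - j) and board[a][b] == pawn:
--                     return True
--     return False
-- ===== Notes on version B (the rewrite author's own statement) =====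
-- stated objective: alternative
-- what changed: Replaces the four directional while-loop diagonal walks with a single whole-board scan testing the diagonal condition |a-i|==|b-j| (plus early return), keeping the identical hard-coded board with its 'a2' typo.
import Mathlib
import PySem

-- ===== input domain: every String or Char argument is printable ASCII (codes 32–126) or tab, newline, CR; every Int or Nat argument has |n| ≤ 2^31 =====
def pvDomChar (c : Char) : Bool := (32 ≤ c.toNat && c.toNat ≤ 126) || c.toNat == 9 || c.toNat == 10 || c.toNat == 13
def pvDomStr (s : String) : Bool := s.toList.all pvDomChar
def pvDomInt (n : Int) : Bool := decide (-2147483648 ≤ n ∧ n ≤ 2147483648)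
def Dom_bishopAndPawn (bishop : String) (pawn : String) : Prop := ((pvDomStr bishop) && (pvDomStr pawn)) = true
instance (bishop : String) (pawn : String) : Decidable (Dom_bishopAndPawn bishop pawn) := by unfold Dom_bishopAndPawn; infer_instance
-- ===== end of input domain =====

-- B replaces the four directional while-loop diagonal walks with one whole-board
-- scan testing |a-i| == |b-j| (alternative decomposition, same fixed-board cost).

-- ===== PORT A =====
-- the hard-coded board, including the 'a2' typo in the last row
def pvBoard : List (List String) :=
  [["a8", "b8", "c8", "d8", "e8", "f8", "g8", "h8"],
   ["a7", "b7", "c7", "d7", "e7", "f7", "g7", "h7"],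
   ["a6", "b6", "c6", "d6", "e6", "f6", "g6", "h6"],
   ["a5", "b5", "c5", "d5", "e5", "f5", "g5", "h5"],
   ["a4", "b4", "c4", "d4", "e4", "f4", "g4", "h4"],
   ["a3", "b3", "c3", "d3", "e3", "f3", "g3", "h3"],
   ["a2", "b2", "c2", "d2", "e2", "f2", "g2", "h2"],
   ["a1", "a2", "c1", "d1", "e1", "f1", "g1", "h1"]]

-- board[i][j]; every access in both programs has 0 ≤ i,j ≤ 7, so getD is exact
def pvCell (i j : Nat) : String := (pvBoard.getD i []).getD j ""

-- the four while-loops; indices stay in 0..7, so 'a != 7' ↔ 'a < 7' and a fuel of 8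
-- (one step per row) is always enough — the fuel is only a structural-termination guard
def walkTL : Nat → Nat → Nat → List String
  | 0, _, _ => []
  | fuel + 1, a, b =>
    if a ≠ 0 ∧ b ≠ 0 then pvCell (a - 1) (b - 1) :: walkTL fuel (a - 1) (b - 1) else []

def walkBL : Nat → Nat → Nat → List String
  | 0, _, _ => []
  | fuel + 1, a, b =>
    if a < 7 ∧ b ≠ 0 then pvCell (a + 1) (b - 1) :: walkBL fuel (a + 1) (b - 1) else []

def walkTR : Nat → Nat → Nat → List String
  | 0, _, _ => []
  | fuel + 1, a, b =>
    if a ≠ 0 ∧ b < 7 then pvCell (a - 1) (b + 1) :: walkTR fuel (a - 1) (b + 1) else []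

def walkBR : Nat → Nat → Nat → List String
  | 0, _, _ => []
  | fuel + 1, a, b =>
    if a < 7 ∧ b < 7 then pvCell (a + 1) (b + 1) :: walkBR fuel (a + 1) (b + 1) else []

-- all moves collected at a matching cell (i, j), in A's append order
def pvWalks (i j : Nat) : List String :=
  walkTL 8 i j ++ (walkBL 8 i j ++ (walkTR 8 i j ++ walkBR 8 i j))

def bishopAndPawn (bishop : String) (pawn : String) : Bool :=
  let posMov := (List.range 8).foldl (fun acc i =>
    (List.range 8).foldl (fun acc j =>
      if pvCell i j == bishop then acc ++ pvWalks i j else acc) acc) []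
  posMov.contains pawn

-- ===== PORT B =====
-- the diagonal test of Source B: (a, b) != (i, j) and abs(a - i) == abs(b - j)
def pvDiag (i j a b : Nat) : Bool :=
  (!(a == i && b == j)) &&
    ((Int.ofNat a - Int.ofNat i).natAbs == (Int.ofNat b - Int.ofNat j).natAbs)

def bishopAndPawn_alt (bishop : String) (pawn : String) : Bool :=
  let positions := (List.range 8).flatMap (fun i =>
    ((List.range 8).filter (fun j => pvCell i j == bishop)).map (fun j => (i, j)))
  positions.any (fun p =>
    (List.range 8).any (fun a => (List.range 8).any (fun b =>
      pvDiag p.1 p.2 a b && (pvCell a b == pawn))))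

-- ===== PRECONDITION & SPEC =====
def Spec_bishopAndPawn (bishop : String) (pawn : String) (out : Bool) : Prop := out = bishopAndPawn_alt bishop pawn
instance (bishop : String) (pawn : String) (out : Bool) : Decidable (Spec_bishopAndPawn bishop pawn out) := by unfold Spec_bishopAndPawn; infer_instance

-- ===== CLAIM (what is proved, stated in full; the proofs are below) =====
def Claim_equal_bishopAndPawn : Prop := ∀ (bishop : String) (pawn : String), Dom_bishopAndPawn bishop pawn → Spec_bishopAndPawn bishop pawn (bishopAndPawn bishop pawn)

-- ===== LEMMAS AND PROOFS =====

-- B's per-cell list of attacked squares, as labels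
def pvDiagList (i j : Nat) : List String :=
  (List.range 8).flatMap (fun a =>
    ((List.range 8).filter (fun b => pvDiag i j a b)).map (fun b => pvCell a b))

-- for every board cell, the four walks and the diagonal scan yield the same label set
theorem walks_subset_diag : ∀ i ∈ List.range 8, ∀ j ∈ List.range 8,
    (pvWalks i j).all (fun s => (pvDiagList i j).contains s) = true ∧
    (pvDiagList i j).all (fun s => (pvWalks i j).contains s) = true := by decide

theorem mem_walks_iff_mem_diag {i j : Nat} (hi : i ∈ List.range 8) (hj : j ∈ List.range 8)
    (s : String) : s ∈ pvWalks i j ↔ s ∈ pvDiagList i j := by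
  obtain ⟨h1, h2⟩ := walks_subset_diag i hi j hj
  simp only [List.all_eq_true, List.contains_iff_mem] at h1 h2
  exact ⟨fun h => h1 s h, fun h => h2 s h⟩

-- A's accumulator as a flatMap
theorem posMov_eq (bishop : String) :
    (List.range 8).foldl (fun acc i =>
      (List.range 8).foldl (fun acc j =>
        if pvCell i j == bishop then acc ++ pvWalks i j else acc) acc) [] =
    (List.range 8).flatMap (fun i => (List.range 8).flatMap (fun j =>
      if pvCell i j == bishop then pvWalks i j else [])) := by
  have inner : ∀ (i : Nat) (acc : List String),
      (List.range 8).foldl (fun acc j =>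
        if pvCell i j == bishop then acc ++ pvWalks i j else acc) acc =
      acc ++ (List.range 8).flatMap (fun j =>
        if pvCell i j == bishop then pvWalks i j else []) := by
    intro i acc
    rw [show (fun (acc : List String) j =>
        if pvCell i j == bishop then acc ++ pvWalks i j else acc) =
        (fun acc j => acc ++ (if pvCell i j == bishop then pvWalks i j else [])) by
      funext acc j; by_cases h : pvCell i j == bishop <;> simp [h]]
    exact PySem.List.foldl_append_eq_flatMap _ _ _
  rw [show (fun (acc : List String) i =>
      (List.range 8).foldl (fun acc j =>
        if pvCell i j == bishop then acc ++ pvWalks i j else acc) acc) =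
      (fun acc i => acc ++ (List.range 8).flatMap (fun j =>
        if pvCell i j == bishop then pvWalks i j else [])) by
    funext acc i; exact inner i acc]
  exact PySem.List.foldl_append_eq_flatMap _ _ _

theorem bishopAndPawn_eq_alt (bishop pawn : String) :
    bishopAndPawn bishop pawn = bishopAndPawn_alt bishop pawn := by
  rw [Bool.eq_iff_iff]
  unfold bishopAndPawn bishopAndPawn_alt
  simp only [posMov_eq, List.contains_iff_mem, List.any_eq_true, List.mem_flatMap,
    List.mem_map, List.mem_filter, List.mem_range]
  constructor
  · rintro ⟨i, hi, j, hj, hmem⟩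
    by_cases hbi : pvCell i j == bishop
    · rw [if_pos hbi] at hmem
      have := (mem_walks_iff_mem_diag (List.mem_range.mpr hi) (List.mem_range.mpr hj)
        pawn).mp hmem
      simp only [pvDiagList, List.mem_flatMap, List.mem_map, List.mem_filter,
        List.mem_range] at this
      obtain ⟨a, ha, b, ⟨hb, hdiag⟩, hc⟩ := this
      refine ⟨(i, j), ⟨i, hi, j, ⟨hj, hbi⟩, rfl⟩, a, ha, b, hb, ?_⟩
      simp [hdiag, hc]
    · rw [if_neg hbi] at hmem
      simp at hmem
  · rintro ⟨p, ⟨i, hi, j, ⟨hj, hbi⟩, hp⟩, a, ha, b, hb, hcond⟩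
    subst hp
    rw [Bool.and_eq_true] at hcond
    obtain ⟨hdiag, hc⟩ := hcond
    refine ⟨i, hi, j, hj, ?_⟩
    rw [if_pos hbi,
      mem_walks_iff_mem_diag (List.mem_range.mpr hi) (List.mem_range.mpr hj)]
    simp only [pvDiagList, List.mem_flatMap, List.mem_map, List.mem_filter, List.mem_range]
    exact ⟨a, ha, b, ⟨hb, hdiag⟩, by simpa using hc⟩

-- ===== VERDICT (by name: the statement is the Claim_ definition above) =====
theorem bishopAndPawn_spec : Claim_equal_bishopAndPawn := by
  intro bishop pawn _
  exact bishopAndPawn_eq_alt bishop pawn
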